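-- pv_equiv track=rewrite | github.com/howard-proj/Inventory | run.py | display_appropriate_optionvalues
-- ===== SOURCE A (Python) =====
-- def display_appropriate_optionvalues(currentdescription):
--     option_list = ["Karton", "Gross", "Lusin", "Pack", "Pcs"]
--     output = []
--
--     for index in range(len(option_list)):
--         val = option_list[index]
--         if val == currentdescription:
--             output.append(val)
--             option_list.pop(index)
--             break
--
--     for val in option_list:
--         output.append(val)
--
--     return output
-- ===== SOURCE B (Python) =====
-- def display_appropriate_optionvalues(currentdescription):
--     option_list = ["Karton", "Gross", "Lusin", "Pack", "Pcs"]
--     return sorted(option_list, key=lambda x: x != currentdescription)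
-- ===== Notes on version B (the rewrite author's own statement) =====
-- stated objective: idiomatic
-- what changed: Replaced the scan-find-pop-break loop plus a second copy loop with a single stable sort whose boolean key moves the matching option to the front.
import Mathlib
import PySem

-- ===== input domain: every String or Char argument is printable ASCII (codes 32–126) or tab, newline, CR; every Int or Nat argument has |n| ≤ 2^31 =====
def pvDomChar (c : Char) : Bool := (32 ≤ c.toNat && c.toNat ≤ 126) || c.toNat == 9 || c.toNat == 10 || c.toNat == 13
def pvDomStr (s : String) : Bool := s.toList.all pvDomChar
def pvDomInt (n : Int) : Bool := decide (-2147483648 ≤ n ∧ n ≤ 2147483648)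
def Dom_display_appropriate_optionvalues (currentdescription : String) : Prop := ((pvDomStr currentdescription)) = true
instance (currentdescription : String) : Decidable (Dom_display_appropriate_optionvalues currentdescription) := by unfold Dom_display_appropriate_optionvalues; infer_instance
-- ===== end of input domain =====

-- B replaces A's scan-find-pop-break plus copy loop with one stable sort on a boolean key (idiomatic, not faster).
-- ===== PORT A =====
-- first loop of A: scan indices; on the first match, output [val], pop it and break;
-- if no match, output stays [] and the list is untouched
def pvAScan (opts : List String) (currentdescription : String) : List Nat → List String × List String
  | [] => ([], opts)                   -- loop ended without break
  | index :: rest =>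
    let val := opts.getD index ""      -- opts[index]; index < len(opts) for every index from range
    if val == currentdescription then ([val], opts.eraseIdx index)  -- output.append(val); pop(index); break
    else pvAScan opts currentdescription rest

def display_appropriate_optionvalues (currentdescription : String) : List String :=
  let option_list := ["Karton", "Gross", "Lusin", "Pack", "Pcs"]
  let r := pvAScan option_list currentdescription (List.range option_list.length)
  -- second loop: append every remaining val to output
  r.2.foldl (fun output val => output ++ [val]) r.1

-- ===== PORT B =====
def display_appropriate_optionvalues_alt (currentdescription : String) : List String :=
  let option_list := ["Karton", "Gross", "Lusin", "Pack", "Pcs"]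
  PySem.List.sorted option_list (fun x => !(x == currentdescription)) false

-- ===== PRECONDITION & SPEC =====
def Spec_display_appropriate_optionvalues (currentdescription : String) (out : List String) : Prop := out = display_appropriate_optionvalues_alt currentdescription
instance (currentdescription : String) (out : List String) : Decidable (Spec_display_appropriate_optionvalues currentdescription out) := by unfold Spec_display_appropriate_optionvalues; infer_instance

-- ===== CLAIM (what is proved, stated in full; the proofs are below) =====
def Claim_equal_display_appropriate_optionvalues : Prop := ∀ (currentdescription : String), Dom_display_appropriate_optionvalues currentdescription → Spec_display_appropriate_optionvalues currentdescription (display_appropriate_optionvalues currentdescription)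

-- ===== LEMMAS AND PROOFS =====

-- ===== VERDICT (by name: the statement is the Claim_ definition above) =====
theorem display_appropriate_optionvalues_spec : Claim_equal_display_appropriate_optionvalues := by
  intro s _
  unfold Spec_display_appropriate_optionvalues
  by_cases h1 : s = "Karton"; · subst h1; decide
  by_cases h2 : s = "Gross"; · subst h2; decide
  by_cases h3 : s = "Lusin"; · subst h3; decide
  by_cases h4 : s = "Pack"; · subst h4; decide
  by_cases h5 : s = "Pcs"; · subst h5; decide
  have b1 : ("Karton" == s) = false := by simp [Ne.symm h1]
  have b2 : ("Gross" == s) = false := by simp [Ne.symm h2]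
  have b3 : ("Lusin" == s) = false := by simp [Ne.symm h3]
  have b4 : ("Pack" == s) = false := by simp [Ne.symm h4]
  have b5 : ("Pcs" == s) = false := by simp [Ne.symm h5]
  simp [display_appropriate_optionvalues, display_appropriate_optionvalues_alt,
    pvAScan, PySem.List.sorted, PySem.List.insertBy, b1, b2, b3, b4, b5, List.foldl,
    show List.range 5 = [0, 1, 2, 3, 4] from by decide, List.getD]
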